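-- pv_equiv track=rewrite | github.com/OctaInsight/ExplainFutures | pages/16_ test_the new_sc.py | calculate_project_statistics
-- ===== SOURCE A (Python) =====
-- from typing import Dict, List, Optional, Tuple
--
-- def calculate_project_statistics(scenarios: List[Dict]) -> Dict:
--     """
--     Calculate project-level statistics from scenarios
--
--     Returns:
--     --------
--     dict with baseline_year, scenario_target_year, total_scenarios
--     """
--     if not scenarios:
--         return {
--             'baseline_year': None,
--             'scenario_target_year': None,
--             'total_scenarios': 0
--         }
--
--     baseline_years = [s.get('baseline_year') for s in scenarios if s.get('baseline_year')]
--     target_years = [s.get('horizon') for s in scenarios if s.get('horizon')]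
--
--     earliest_baseline = min(baseline_years) if baseline_years else None
--     latest_target = max(target_years) if target_years else None
--
--     return {
--         'baseline_year': earliest_baseline,
--         'scenario_target_year': latest_target,
--         'total_scenarios': len(scenarios)
--     }
-- ===== SOURCE B (Python) =====
-- def calculate_project_statistics(scenarios):
--     """Single-pass re-implementation: running min/max and a counter instead of
--     building intermediate lists."""
--     earliest = None
--     latest = None
--     count = 0
--     for s in scenarios:
--         b = s.get('baseline_year')
--         if b:
--             if earliest is None or b < earliest:
--                 earliest = b
--         t = s.get('horizon')
--         if t:
--             if latest is None or t > latest: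
--                 latest = t
--         count += 1
--     return {
--         'baseline_year': earliest,
--         'scenario_target_year': latest,
--         'total_scenarios': count
--     }
-- ===== Notes on version B (the rewrite author's own statement) =====
-- stated objective: alternative
-- what changed: Replaced the two list comprehensions plus min()/max() with one pass over scenarios maintaining running earliest-baseline/latest-target accumulators and a counter, with no intermediate lists and no special-cased empty branch.
import Mathlib
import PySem

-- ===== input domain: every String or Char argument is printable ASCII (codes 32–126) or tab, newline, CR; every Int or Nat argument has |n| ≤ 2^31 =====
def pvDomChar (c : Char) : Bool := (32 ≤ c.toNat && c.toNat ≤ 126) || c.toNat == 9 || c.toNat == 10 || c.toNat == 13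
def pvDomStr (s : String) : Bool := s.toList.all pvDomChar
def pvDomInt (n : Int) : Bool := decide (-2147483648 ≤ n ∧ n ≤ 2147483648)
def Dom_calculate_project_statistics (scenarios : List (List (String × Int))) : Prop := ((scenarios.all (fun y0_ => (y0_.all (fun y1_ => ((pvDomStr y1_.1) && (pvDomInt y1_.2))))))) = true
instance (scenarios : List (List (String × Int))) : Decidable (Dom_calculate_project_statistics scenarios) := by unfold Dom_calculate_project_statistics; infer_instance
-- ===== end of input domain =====

-- B replaces the two filtered comprehensions + min()/max() with one fold keeping
-- running earliest/latest accumulators and a counter (objective: alternative decomposition).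


-- ===== PORT A =====
-- s.get(k) on a dict ported as first-match lookup on the association list
def calculate_project_statistics (scenarios : List (List (String × Int))) : List (String × Option Int) :=
  if scenarios = [] then
    [("baseline_year", none), ("scenario_target_year", none), ("total_scenarios", some 0)]
  else
    let baseline_years := scenarios.filterMap (fun s =>
      match s.lookup "baseline_year" with
      | some v => if v ≠ 0 then some v else none
      | none => none)
    let target_years := scenarios.filterMap (fun s =>
      match s.lookup "horizon" with
      | some v => if v ≠ 0 then some v else none
      | none => none)
    let earliest_baseline := PySem.List.min? baseline_years (fun x => x)
    let latest_target := PySem.List.max? target_years (fun x => x)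
    [("baseline_year", earliest_baseline), ("scenario_target_year", latest_target),
     ("total_scenarios", some (scenarios.length : Int))]

-- ===== PORT B =====
def cps_step (st : Option Int × Option Int × Int) (s : List (String × Int)) :
    Option Int × Option Int × Int :=
  let e := st.1
  let t := st.2.1
  let c := st.2.2
  let e' := match s.lookup "baseline_year" with
    | some b => if b ≠ 0 then
        (match e with
         | none => some b
         | some w => if b < w then some b else some w)
      else e
    | none => e
  let t' := match s.lookup "horizon" with
    | some h => if h ≠ 0 then
        (match t with
         | none => some h
         | some w => if h > w then some h else some w)
      else t
    | none => t
  (e', t', c + 1)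

def calculate_project_statistics_alt (scenarios : List (List (String × Int))) : List (String × Option Int) :=
  let st := scenarios.foldl cps_step (none, none, 0)
  [("baseline_year", st.1), ("scenario_target_year", st.2.1), ("total_scenarios", some st.2.2)]

-- ===== PRECONDITION & SPEC =====
def Spec_calculate_project_statistics (scenarios : List (List (String × Int))) (out : List (String × Option Int)) : Prop := out = calculate_project_statistics_alt scenarios
instance (scenarios : List (List (String × Int))) (out : List (String × Option Int)) : Decidable (Spec_calculate_project_statistics scenarios out) := by unfold Spec_calculate_project_statistics; infer_instance

-- ===== CLAIM (what is proved, stated in full; the proofs are below) =====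
def Claim_equal_calculate_project_statistics : Prop := ∀ (scenarios : List (List (String × Int))), Dom_calculate_project_statistics scenarios → Spec_calculate_project_statistics scenarios (calculate_project_statistics scenarios)

-- ===== LEMMAS AND PROOFS =====

def cps_fB (s : List (String × Int)) : Option Int :=
  match s.lookup "baseline_year" with
  | some v => if v ≠ 0 then some v else none
  | none => none

def cps_fT (s : List (String × Int)) : Option Int :=
  match s.lookup "horizon" with
  | some v => if v ≠ 0 then some v else none
  | none => none

def cps_minStep (e : Option Int) (v : Int) : Option Int :=
  match e with
  | none => some v
  | some w => if v < w then some v else some w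

def cps_maxStep (t : Option Int) (v : Int) : Option Int :=
  match t with
  | none => some v
  | some w => if v > w then some v else some w

-- the triple fold splits into three independent folds
theorem cps_foldl_split (l : List (List (String × Int))) (e t : Option Int) (c : Int) :
    l.foldl cps_step (e, t, c) =
      ((l.filterMap cps_fB).foldl cps_minStep e,
       (l.filterMap cps_fT).foldl cps_maxStep t,
       c + l.length) := by
  induction l generalizing e t c with
  | nil => simp
  | cons s rest ih =>
    simp only [List.foldl_cons, List.filterMap_cons]
    rw [show cps_step (e, t, c) s =
        ((match cps_fB s with | some v => cps_minStep e v | none => e),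
         (match cps_fT s with | some v => cps_maxStep t v | none => t),
         c + 1) from by
      simp only [cps_step, cps_fB, cps_fT, cps_minStep, cps_maxStep]
      rcases s.lookup "baseline_year" with _ | b <;>
        rcases s.lookup "horizon" with _ | h <;> simp <;> split_ifs <;> (first | exact ⟨rfl, rfl⟩ | rfl)]
    rw [ih]
    rcases hb : cps_fB s with _ | v <;> rcases ht : cps_fT s with _ | w <;>
      simp [List.length_cons] <;> omega

theorem cps_minStep_eq (v w : Int) : cps_minStep (some w) v = some (min w v) := by
  simp only [cps_minStep]
  rcases lt_or_ge v w with h | h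
  · simp [h, min_eq_right h.le]
  · simp [not_lt.mpr h, min_eq_left h]

theorem cps_maxStep_eq (v w : Int) : cps_maxStep (some w) v = some (max w v) := by
  simp only [cps_maxStep]
  rcases lt_or_ge w v with h | h
  · simp [h, max_eq_right h.le]
  · simp [not_lt.mpr h, max_eq_left h]

theorem cps_fold_min_some (xs : List Int) (w : Int) :
    xs.foldl cps_minStep (some w) = some (xs.foldl min w) := by
  induction xs generalizing w with
  | nil => rfl
  | cons x t ih => simp [cps_minStep_eq, ih]

theorem cps_fold_max_some (xs : List Int) (w : Int) :
    xs.foldl cps_maxStep (some w) = some (xs.foldl max w) := by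
  induction xs generalizing w with
  | nil => rfl
  | cons x t ih => simp [cps_maxStep_eq, ih]

theorem cps_fold_min_none (xs : List Int) :
    xs.foldl cps_minStep none = PySem.List.min? xs (fun x => x) := by
  cases xs with
  | nil => rfl
  | cons x t =>
    rw [PySem.List.min?_id_cons]
    simpa [cps_minStep] using cps_fold_min_some t x

theorem cps_fold_max_none (xs : List Int) :
    xs.foldl cps_maxStep none = PySem.List.max? xs (fun x => x) := by
  cases xs with
  | nil => rfl
  | cons x t =>
    rw [PySem.List.max?_id_cons]
    simpa [cps_maxStep] using cps_fold_max_some t x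

-- ===== VERDICT (by name: the statement is the Claim_ definition above) =====
theorem calculate_project_statistics_spec : Claim_equal_calculate_project_statistics := by
  intro scenarios _
  unfold Spec_calculate_project_statistics
  unfold calculate_project_statistics calculate_project_statistics_alt
  rcases scenarios with _ | ⟨s, rest⟩
  · rfl
  · simp only [if_neg (List.cons_ne_nil s rest)]
    rw [cps_foldl_split, cps_fold_min_none, cps_fold_max_none]
    simp [cps_fB, cps_fT]
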